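-- pv_equiv track=rewrite | github.com/EarthSciML/EarthSciSerialization | packages/earthsci_toolkit/src/earthsci_toolkit/simulation.py | _linear_pos
-- ===== SOURCE A (Python) =====
-- from typing import Dict, List, Set, Tuple, Optional, Union, Any, Callable
--
-- class SimulationError(Exception):
--     """Exception raised during simulation."""
--     pass
--
-- def _linear_pos(shape: Tuple[int, ...], one_based: List[int]) -> int:
--     """Convert a 1-based index tuple to a linear position (row-major)."""
--     if len(shape) != len(one_based):
--         raise SimulationError(
--             f"index rank mismatch: shape={shape} idx={one_based}"
--         )
--     lin = 0
--     for d, i in enumerate(one_based):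
--         zero = int(i) - 1
--         if zero < 0 or zero >= shape[d]:
--             raise SimulationError(
--                 f"index {i} out of range for dim {d} of shape {shape}"
--             )
--         lin = lin * shape[d] + zero
--     return lin
-- ===== SOURCE B (Python) =====
-- class SimulationError(Exception):
--     """Exception raised during simulation."""
--     pass
--
-- def _linear_pos(shape, one_based):
--     """Convert a 1-based index tuple to a linear position (row-major)."""
--     if len(shape) != len(one_based):
--         raise SimulationError(
--             f"index rank mismatch: shape={shape} idx={one_based}"
--         )
--     # pass 1 (left to right): validate and collect zero-based indices
--     zeros = []
--     for d, i in enumerate(one_based):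
--         zero = int(i) - 1
--         if zero < 0 or zero >= shape[d]:
--             raise SimulationError(
--                 f"index {i} out of range for dim {d} of shape {shape}"
--             )
--         zeros.append(zero)
--     # pass 2 (right to left): accumulate stride-weighted sum back-to-front
--     lin = 0
--     stride = 1
--     for s, z in zip(reversed(shape), reversed(zeros)):
--         lin += stride * z
--         stride *= s
--     return lin
-- ===== Notes on version B (the rewrite author's own statement) =====
-- stated objective: alternative
-- what changed: Splits A's single forward Horner loop into two staged passes: a left-to-right validation pass collecting zero-based indices, then a right-to-left accumulation that sums stride*index while growing the stride, instead of lin = lin*shape[d]+zero.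
import Mathlib
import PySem

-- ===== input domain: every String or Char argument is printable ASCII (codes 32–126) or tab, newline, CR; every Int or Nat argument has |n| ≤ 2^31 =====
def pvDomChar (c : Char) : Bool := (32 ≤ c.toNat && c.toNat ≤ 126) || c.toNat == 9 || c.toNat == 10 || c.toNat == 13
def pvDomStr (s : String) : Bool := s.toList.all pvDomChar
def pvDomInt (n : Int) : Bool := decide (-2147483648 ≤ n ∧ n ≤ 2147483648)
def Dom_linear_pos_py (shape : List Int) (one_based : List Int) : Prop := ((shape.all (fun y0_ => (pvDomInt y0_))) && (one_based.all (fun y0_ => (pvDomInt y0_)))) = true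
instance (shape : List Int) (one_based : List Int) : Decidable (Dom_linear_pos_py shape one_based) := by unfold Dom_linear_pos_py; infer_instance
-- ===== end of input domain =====

-- B replaces A's single forward Horner loop by two staged passes: a left-to-right validation pass collecting zero-based indices, then a right-to-left stride-weighted accumulation (alternative decomposition, same cost).


-- ===== PORT A =====
-- A's single loop: Horner accumulation lin := lin * shape[d] + (i - 1); the two
-- raise sites (rank mismatch, out-of-range index) return 0 here, excluded by Pre_.
def linearPosALoop : List (Int × Int) → Int → Int
  | [], lin => lin
  | (s, i) :: rest, lin =>
    let zero := i - 1
    if zero < 0 ∨ zero ≥ s then 0  -- Python: raise SimulationError (excluded by Pre_)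
    else linearPosALoop rest (lin * s + zero)

def linear_pos_py (shape : List Int) (one_based : List Int) : Int :=
  if shape.length ≠ one_based.length then 0  -- Python: raise SimulationError (excluded by Pre_)
  else linearPosALoop (shape.zip one_based) 0

-- ===== PORT B =====
-- pass 1: left-to-right validation collecting zero-based indices (none = raise)
def linearPosZeros : List (Int × Int) → Option (List Int)
  | [] => some []
  | (s, i) :: rest =>
    let zero := i - 1
    if zero < 0 ∨ zero ≥ s then none  -- Python: raise SimulationError (excluded by Pre_)
    else (linearPosZeros rest).map (fun zs => zero :: zs)

-- pass 2: left-to-right over the REVERSED pairs, state (lin, stride)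
def linearPosRevLoop : List (Int × Int) → Int → Int → Int
  | [], lin, _ => lin
  | (s, z) :: rest, lin, stride => linearPosRevLoop rest (lin + stride * z) (stride * s)

def linear_pos_py_alt (shape : List Int) (one_based : List Int) : Int :=
  if shape.length ≠ one_based.length then 0  -- Python: raise SimulationError (excluded by Pre_)
  else
    match linearPosZeros (shape.zip one_based) with
    | none => 0  -- Python: raise SimulationError (excluded by Pre_)
    | some zs => linearPosRevLoop (shape.reverse.zip zs.reverse) 0 1

-- ===== PRECONDITION & SPEC =====
-- Pre_ excludes exactly the inputs on which Python A raises SimulationError: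
-- rank mismatch, or some 1-based index outside [1, shape[d]].
def Pre_linear_pos_py (shape : List Int) (one_based : List Int) : Prop :=
  List.Forall₂ (fun s i => 1 ≤ i ∧ i ≤ s) shape one_based
instance (shape : List Int) (one_based : List Int) : Decidable (Pre_linear_pos_py shape one_based) := by unfold Pre_linear_pos_py; infer_instance
def pvWitness_linear_pos_py : List Int × List Int := ([3, 4, 5], [2, 1, 5])
def Spec_linear_pos_py (shape : List Int) (one_based : List Int) (out : Int) : Prop := out = linear_pos_py_alt shape one_based
instance (shape : List Int) (one_based : List Int) (out : Int) : Decidable (Spec_linear_pos_py shape one_based out) := by unfold Spec_linear_pos_py; infer_instance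

-- ===== CLAIM (what is proved, stated in full; the proofs are below) =====
def Claim_equal_linear_pos_py : Prop := ∀ (shape : List Int) (one_based : List Int), Dom_linear_pos_py shape one_based → Pre_linear_pos_py shape one_based → Spec_linear_pos_py shape one_based (linear_pos_py shape one_based)

-- ===== LEMMAS AND PROOFS =====
-- Under the bounds, the validation pass succeeds with zeros = one_based.map (· - 1).
theorem zeros_eq : ∀ (sh ob : List Int), List.Forall₂ (fun s i => 1 ≤ i ∧ i ≤ s) sh ob →
    linearPosZeros (sh.zip ob) = some (ob.map (fun i => i - 1)) := by
  intro sh ob h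
  induction h with
  | nil => simp [linearPosZeros]
  | cons hb _ ih =>
    simp only [List.zip_cons_cons, linearPosZeros, List.map_cons, ih]
    rw [if_neg (by omega)]
    rfl

-- Appending one pair to the rev-loop adds stride·(product of seen dims)·z.
theorem revLoop_append : ∀ (l : List (Int × Int)) (s z lin stride : Int),
    linearPosRevLoop (l ++ [(s, z)]) lin stride
      = linearPosRevLoop l lin stride + (stride * (l.map Prod.fst).prod) * z := by
  intro l
  induction l with
  | nil => intro s z lin stride; simp [linearPosRevLoop]
  | cons p rest ih =>
    intro s z lin stride
    obtain ⟨ps, pz⟩ := p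
    simp only [List.cons_append, linearPosRevLoop, ih, List.map_cons, List.prod_cons]
    ring_nf

-- A's loop is affine in its accumulator (under the bounds no branch fires).
theorem aLoop_affine : ∀ (sh ob : List Int), List.Forall₂ (fun s i => 1 ≤ i ∧ i ≤ s) sh ob →
    ∀ (acc : Int), linearPosALoop (sh.zip ob) acc
      = acc * sh.prod + linearPosALoop (sh.zip ob) 0 := by
  intro sh ob h
  induction h with
  | nil => intro acc; simp [linearPosALoop]
  | @cons s i sh' ob' hb _ ih =>
    intro acc
    simp only [List.zip_cons_cons, linearPosALoop]
    rw [if_neg (by omega), if_neg (by omega), ih (acc * s + (i - 1)), ih (0 * s + (i - 1)),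
      List.prod_cons]
    ring

-- Core: the reversed stride-sum pass equals A's forward Horner pass.
theorem revLoop_eq_aLoop : ∀ (sh ob : List Int), List.Forall₂ (fun s i => 1 ≤ i ∧ i ≤ s) sh ob →
    ∀ (lin stride : Int),
    linearPosRevLoop ((sh.zip (ob.map (fun i => i - 1))).reverse) lin stride
      = lin + stride * linearPosALoop (sh.zip ob) 0 := by
  intro sh ob h
  induction h with
  | nil => intro lin stride; simp [linearPosRevLoop, linearPosALoop]
  | @cons s i sh' ob' hb htail ih =>
    intro lin stride
    simp only [List.map_cons, List.zip_cons_cons, List.reverse_cons, revLoop_append, ih,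
      linearPosALoop]
    rw [if_neg (by omega), aLoop_affine sh' ob' htail (0 * s + (i - 1))]
    have hfst : (((sh'.zip (ob'.map (fun i => i - 1))).reverse).map Prod.fst).prod = sh'.prod := by
      rw [List.map_reverse, List.prod_reverse]
      have hle : sh'.length ≤ (ob'.map (fun i => i - 1)).length := by
        rw [List.length_map, htail.length_eq]
      rw [List.map_fst_zip hle]
    rw [hfst]
    ring

theorem linear_pos_py_spec : Claim_equal_linear_pos_py := by
  intro shape one_based _ hpre
  unfold Spec_linear_pos_py linear_pos_py linear_pos_py_alt
  have hlen : shape.length = one_based.length := hpre.length_eq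
  rw [zeros_eq shape one_based hpre]
  simp only [hlen, ne_eq, not_true_eq_false, if_false]
  have hzip : shape.reverse.zip ((one_based.map (fun i => i - 1)).reverse)
      = (shape.zip (one_based.map (fun i => i - 1))).reverse := by
    exact Eq.symm (List.reverse_zipWith (by rw [List.length_map, hlen]))
  rw [hzip, revLoop_eq_aLoop shape one_based hpre 0 1]
  ring
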